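-- pv_equiv track=rewrite | github.com/SultanGG505/GAIS | tsp.py | replace_population
-- ===== SOURCE A (Python) =====
-- def calculate_fitness(individual, distance_matrix):
--     """Вычисляет приспособленность особи (суммарное расстояние маршрута)."""
--     total_distance = 0
--     num_nodes = len(distance_matrix)
--
--     if len(individual) != num_nodes + 1:
--          return float('inf')
--
--     for i in range(len(individual) - 1):
--         city1_index = individual[i] - 1
--         city2_index = individual[i+1] - 1
--
--         if 0 <= city1_index < num_nodes and 0 <= city2_index < num_nodes:
--              total_distance += distance_matrix[city1_index][city2_index]
--         else:
--              return float('inf')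
--
--     return total_distance
--
-- def replace_population(population, offspring, distance_matrix, population_size):
--     """Формирует новое поколение из старой популяции и потомков."""
--     combined_population = population + offspring
--     valid_population = [ind for ind in combined_population if calculate_fitness(ind, distance_matrix) != float('inf')]
--
--     valid_population.sort(key=lambda x: calculate_fitness(x, distance_matrix))
--
--     new_population = []
--     seen_individuals = set()
--     for individual in valid_population:
--         individual_tuple = tuple(individual)
--         if individual_tuple not in seen_individuals:
--             new_population.append(individual)
--             seen_individuals.add(individual_tuple)
--             if len(new_population) >= population_size:
--                 break
--
--     return new_population
-- ===== SOURCE B (Python) =====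
-- def route_length(individual, distance_matrix):
--     """Total route distance of a well-formed route, or None if the route is malformed."""
--     n = len(distance_matrix)
--     if len(individual) != n + 1:
--         return None
--     if len(individual) > 1 and any(not (1 <= c <= n) for c in individual):
--         return None
--     return sum(distance_matrix[individual[i] - 1][individual[i + 1] - 1]
--                for i in range(len(individual) - 1))
--
-- def replace_population(population, offspring, distance_matrix, population_size):
--     """Keep the best population_size distinct well-formed individuals (partial selection, no sort)."""
--     candidates = []
--     seen = set()
--     for ind in population + offspring:
--         key = tuple(ind)
--         if key not in seen:
--             seen.add(key)
--             f = route_length(ind, distance_matrix)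
--             if f is not None:
--                 candidates.append((f, ind))
--     result = []
--     while candidates and len(result) < population_size:
--         best = 0
--         for j in range(1, len(candidates)):
--             if candidates[j][0] < candidates[best][0]:
--                 best = j
--         result.append(candidates.pop(best)[1])
--     return result
-- ===== Notes on version B (the rewrite author's own statement) =====
-- stated objective: alternative
-- what changed: B never sorts: one pass over population+offspring dedups first and computes each unique individual's fitness once into a candidate list, then a k-round partial selection repeatedly scans for the first-minimum candidate and pops it, instead of A's filter pass, full stable sort with recomputed fitness key, and dedup-with-seen-set during the take.
-- intended difference: When population_size <= 0 and at least one individual is a well-formed route, A returns a one-element population (its size check runs only after an append), while B returns the empty population, which is what a requested size of at most 0 means. — e.g. on replace_population([[1, 2, 1]], [], [[0, 5], [5, 0]], 0): A returns [[1, 2, 1]], B returns []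
-- outside the precondition, e.g. on replace_population([[3, 1, 2]], [], [[5], [1, 2]], 1): A returns [], B returns []
import Mathlib
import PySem

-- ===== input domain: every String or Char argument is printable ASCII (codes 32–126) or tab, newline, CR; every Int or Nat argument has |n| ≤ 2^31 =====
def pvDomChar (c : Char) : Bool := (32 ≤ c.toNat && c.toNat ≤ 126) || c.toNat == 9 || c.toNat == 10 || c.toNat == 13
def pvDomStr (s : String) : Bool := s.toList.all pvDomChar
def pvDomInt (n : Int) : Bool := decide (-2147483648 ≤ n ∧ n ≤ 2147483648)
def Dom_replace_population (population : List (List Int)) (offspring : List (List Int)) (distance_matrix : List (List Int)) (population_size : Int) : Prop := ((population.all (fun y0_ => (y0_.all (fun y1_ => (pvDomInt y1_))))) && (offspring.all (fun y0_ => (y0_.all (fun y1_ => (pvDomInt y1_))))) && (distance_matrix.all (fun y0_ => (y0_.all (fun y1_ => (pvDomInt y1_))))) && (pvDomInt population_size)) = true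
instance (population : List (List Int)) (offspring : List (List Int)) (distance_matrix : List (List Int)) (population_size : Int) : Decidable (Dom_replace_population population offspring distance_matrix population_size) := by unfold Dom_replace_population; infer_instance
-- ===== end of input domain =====

-- B never sorts: one pass dedups population+offspring and computes each unique individual's
-- fitness once into a candidate list, then a k-round partial selection repeatedly scans for the
-- first-minimum candidate and pops it; B also returns the empty population when
-- population_size ≤ 0, where A returns one individual (see D_ below).

-- ===== PORT A =====
-- float('inf') is modelled as `none`; A's early `return inf` is ported as an absorbing `none`
-- state of the fold; the row access distance_matrix[c1][c2] uses pyGetD (in bounds under Pre_).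
def calculate_fitness (individual : List Int) (distance_matrix : List (List Int)) : Option Int :=
  let num_nodes : Int := (distance_matrix.length : Int)
  if (individual.length : Int) ≠ num_nodes + 1 then none else
  (PySem.List.pyRange 0 ((individual.length : Int) - 1) 1).foldl
    (fun acc i =>
      match acc with
      | none => none
      | some total =>
        let city1 := PySem.List.pyGetD individual i 0 - 1
        let city2 := PySem.List.pyGetD individual (i + 1) 0 - 1
        if 0 ≤ city1 ∧ city1 < num_nodes ∧ 0 ≤ city2 ∧ city2 < num_nodes then
          some (total + PySem.List.pyGetD (PySem.List.pyGetD distance_matrix city1 []) city2 0)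
        else none)
    (some 0)

-- A's dedup-while-taking loop with its post-append break (`if len(new_population) >= population_size: break`).
def replacePopTake : List (List Int) → List (List Int) → PySem.Set (List Int) → Int → List (List Int)
  | [], newp, _, _ => newp
  | ind :: rest, newp, seen, psize =>
    if PySem.Set.contains seen ind then replacePopTake rest newp seen psize
    else
      if psize ≤ ((newp ++ [ind]).length : Int) then newp ++ [ind]
      else replacePopTake rest (newp ++ [ind]) (PySem.Set.add seen ind) psize

-- the sort key `calculate_fitness(x, distance_matrix)`: on the filtered (valid) list every key is
-- a finite integer `some k`, extracted with getD 0.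
def replace_population (population : List (List Int)) (offspring : List (List Int)) (distance_matrix : List (List Int)) (population_size : Int) : List (List Int) :=
  let combined := population ++ offspring
  let valid := combined.filter (fun ind => (calculate_fitness ind distance_matrix).isSome)
  let sortedv := PySem.List.sorted valid (fun x => (calculate_fitness x distance_matrix).getD 0) false
  replacePopTake sortedv [] PySem.Set.empty population_size

-- ===== PORT B =====
-- `None` is modelled as `none`; the row access uses pyGetD (in bounds under Pre_).
def route_length (individual : List Int) (distance_matrix : List (List Int)) : Option Int :=
  let n : Int := (distance_matrix.length : Int)
  if (individual.length : Int) ≠ n + 1 then none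
  else if 1 < individual.length ∧ individual.any (fun c => !(decide (1 ≤ c ∧ c ≤ n))) then none
  else some (((PySem.List.pyRange 0 ((individual.length : Int) - 1) 1).map
      (fun i => PySem.List.pyGetD
          (PySem.List.pyGetD distance_matrix (PySem.List.pyGetD individual i 0 - 1) [])
          (PySem.List.pyGetD individual (i + 1) 0 - 1) 0)).sum)

-- B's build pass: state = (candidates, seen); each unique individual's fitness computed once.
def buildCandidates (distance_matrix : List (List Int)) (l : List (List Int)) :
    List (Int × List Int) × PySem.Set (List Int) :=
  l.foldl (fun st ind =>
    if PySem.Set.contains st.2 ind then st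
    else
      let seen := PySem.Set.add st.2 ind
      match route_length ind distance_matrix with
      | some f => (st.1 ++ [(f, ind)], seen)
      | none => (st.1, seen)) ([], PySem.Set.empty)

-- B's inner scan: `best = 0; for j in range(1, len(candidates)): if candidates[j][0] < candidates[best][0]: best = j`.
def bestIdx (c : List (Int × List Int)) : Int :=
  (PySem.List.pyRange 1 (c.length : Int) 1).foldl
    (fun best j =>
      if (PySem.List.pyGetD c j (0, [])).1 < (PySem.List.pyGetD c best (0, [])).1 then j else best) 0

-- B's `while candidates and len(result) < population_size` selection loop; candidates.pop(best)
-- is pop? (its `none` is Python's IndexError, unreachable since best indexes a nonempty list).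
def selectLoop : Nat → List (Int × List Int) → List (List Int) → Int → List (List Int)
  | 0, _, result, _ => result
  | fuel + 1, c, result, psize =>
    if c = [] ∨ psize ≤ (result.length : Int) then result
    else
      match PySem.List.pop? c (bestIdx c) with
      | some pr => selectLoop fuel pr.2 (result ++ [pr.1.2]) psize
      | none => result

def replace_population_alt (population : List (List Int)) (offspring : List (List Int)) (distance_matrix : List (List Int)) (population_size : Int) : List (List Int) :=
  let candidates := (buildCandidates distance_matrix (population ++ offspring)).1
  selectLoop candidates.length candidates [] population_size

-- ===== PRECONDITION & SPEC =====
-- Pre_ excludes ragged distance matrices on which the Python programs raise IndexError: A checks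
-- city indices only against the matrix HEIGHT, so a row shorter than a referenced city index is
-- indexed out of range.  The condition requires row-width for every in-range pair of a
-- route-length individual, which is slightly wider than the exact raise set (A stops at its first
-- out-of-range city and may never reach the short row — see cites), but is checkable without
-- running the loop.
def Pre_replace_population (population : List (List Int)) (offspring : List (List Int)) (distance_matrix : List (List Int)) (population_size : Int) : Prop :=
  (let n := distance_matrix.length
   let rowLens := (distance_matrix.map List.length).toArray
   (population ++ offspring).all fun ind =>
     !(ind.length == n + 1) ||
     ((ind.zip ind.tail).all fun p =>
       !(decide (1 ≤ p.1) && decide (p.1 ≤ (n : Int)) && decide (1 ≤ p.2) && decide (p.2 ≤ (n : Int))) ||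
       decide ((p.2 - 1).toNat < rowLens.getD (p.1 - 1).toNat 0))) = true
instance (population : List (List Int)) (offspring : List (List Int)) (distance_matrix : List (List Int)) (population_size : Int) : Decidable (Pre_replace_population population offspring distance_matrix population_size) := by unfold Pre_replace_population; infer_instance

def pvWitness_replace_population : List (List Int) × List (List Int) × List (List Int) × Int :=
  ([[1, 2, 1]], [], [[0, 5], [5, 0]], 1)

-- When population_size ≤ 0 and some individual is a well-formed route, A still returns one
-- individual (its size check runs only after an append), while B returns the empty population,
-- which is what a requested size of at most 0 means.
def D_replace_population (population : List (List Int)) (offspring : List (List Int)) (distance_matrix : List (List Int)) (population_size : Int) : Prop :=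
  (decide (population_size ≤ 0) &&
    (let n := distance_matrix.length
     (population ++ offspring).any fun ind =>
       ind.length == n + 1 &&
       (decide (ind.length < 2) ||
         ind.all fun c => decide (1 ≤ c) && decide (c ≤ (n : Int))))) = true
instance (population : List (List Int)) (offspring : List (List Int)) (distance_matrix : List (List Int)) (population_size : Int) : Decidable (D_replace_population population offspring distance_matrix population_size) := by unfold D_replace_population; infer_instance

def Spec_replace_population (population : List (List Int)) (offspring : List (List Int)) (distance_matrix : List (List Int)) (population_size : Int) (out : List (List Int)) : Prop := ¬ D_replace_population population offspring distance_matrix population_size → out = replace_population_alt population offspring distance_matrix population_size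
instance (population : List (List Int)) (offspring : List (List Int)) (distance_matrix : List (List Int)) (population_size : Int) (out : List (List Int)) : Decidable (Spec_replace_population population offspring distance_matrix population_size out) := by unfold Spec_replace_population; infer_instance

def pvDiffWitness_replace_population : List (List Int) × List (List Int) × List (List Int) × Int :=
  ([[1, 2, 1]], [], [[0, 5], [5, 0]], 0)
def pvDiffWitnessOut_replace_population : (List (List Int)) × (List (List Int)) :=
  ([[1, 2, 1]], [])

-- ===== CLAIM (what is proved, stated in full; the proofs are below) =====
def Claim_unchanged_replace_population : Prop := ∀ (population : List (List Int)) (offspring : List (List Int)) (distance_matrix : List (List Int)) (population_size : Int), Dom_replace_population population offspring distance_matrix population_size → Pre_replace_population population offspring distance_matrix population_size → Spec_replace_population population offspring distance_matrix population_size (replace_population population offspring distance_matrix population_size)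
def Claim_changed_replace_population : Prop := Dom_replace_population (pvDiffWitness_replace_population.1) (pvDiffWitness_replace_population.2.1) (pvDiffWitness_replace_population.2.2.1) (pvDiffWitness_replace_population.2.2.2) ∧ Pre_replace_population (pvDiffWitness_replace_population.1) (pvDiffWitness_replace_population.2.1) (pvDiffWitness_replace_population.2.2.1) (pvDiffWitness_replace_population.2.2.2) ∧ D_replace_population (pvDiffWitness_replace_population.1) (pvDiffWitness_replace_population.2.1) (pvDiffWitness_replace_population.2.2.1) (pvDiffWitness_replace_population.2.2.2) ∧ replace_population (pvDiffWitness_replace_population.1) (pvDiffWitness_replace_population.2.1) (pvDiffWitness_replace_population.2.2.1) (pvDiffWitness_replace_population.2.2.2) = pvDiffWitnessOut_replace_population.1 ∧ replace_population_alt (pvDiffWitness_replace_population.1) (pvDiffWitness_replace_population.2.1) (pvDiffWitness_replace_population.2.2.1) (pvDiffWitness_replace_population.2.2.2) = pvDiffWitnessOut_replace_population.2 ∧ pvDiffWitnessOut_replace_population.1 ≠ pvDiffWitnessOut_replace_population.2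
def Claim_exact_replace_population : Prop := ∀ (population : List (List Int)) (offspring : List (List Int)) (distance_matrix : List (List Int)) (population_size : Int), Dom_replace_population population offspring distance_matrix population_size → Pre_replace_population population offspring distance_matrix population_size → D_replace_population population offspring distance_matrix population_size → replace_population population offspring distance_matrix population_size ≠ replace_population_alt population offspring distance_matrix population_size

-- ===== LEMMAS AND PROOFS =====
-- `rdedup seen l` = the elements of l not in seen, first occurrences only, in order: the common
-- shape of A's seen-set dedup and B's build pass.
def rdedup : List (List Int) → List (List Int) → List (List Int)
  | _, [] => []
  | seen, x :: r => if x ∈ seen then rdedup seen r else x :: rdedup (x :: seen) r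

theorem rdedup_cons (seen : List (List Int)) (x : List Int) (r : List (List Int)) :
    rdedup seen (x :: r) = if x ∈ seen then rdedup seen r else x :: rdedup (x :: seen) r := by
  rw [rdedup]
theorem rdedup_congr (s₁ s₂ l : List (List Int))
    (h : ∀ y ∈ l, (y ∈ s₁ ↔ y ∈ s₂)) : rdedup s₁ l = rdedup s₂ l := by
  induction l generalizing s₁ s₂ with
  | nil => rfl
  | cons x r ih =>
    have hx := h x (by simp)
    by_cases hm : x ∈ s₁
    · simp [rdedup, hm, hx.mp hm, ih s₁ s₂ (fun y hy => h y (by simp [hy]))]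
    · have hm2 : x ∉ s₂ := fun hc => hm (hx.mpr hc)
      simp only [rdedup, if_neg hm, if_neg hm2]
      exact congrArg _ (ih _ _ (fun y hy => by
        simp only [List.mem_cons]
        exact or_congr Iff.rfl (h y (by simp [hy]))))

theorem mem_of_mem_rdedup {seen l : List (List Int)} {y : List Int}
    (h : y ∈ rdedup seen l) : y ∈ l := by
  induction l generalizing seen with
  | nil => simpa [rdedup] using h
  | cons x r ih =>
    simp only [rdedup] at h
    split at h
    · exact List.mem_cons_of_mem _ (ih h)
    · rcases List.mem_cons.mp h with h | h
      · simp [h]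
      · exact List.mem_cons_of_mem _ (ih h)

theorem rdedup_append_singleton (seen l : List (List Int)) (x : List Int) :
    rdedup seen (l ++ [x]) =
      if x ∈ seen ∨ x ∈ l then rdedup seen l else rdedup seen l ++ [x] := by
  induction l generalizing seen with
  | nil => by_cases h : x ∈ seen <;> simp [rdedup, h]
  | cons y r ih =>
    by_cases hy : y ∈ seen
    · simp only [List.cons_append, rdedup, if_pos hy, ih]
      by_cases hx : x ∈ seen ∨ x ∈ r
      · rw [if_pos hx, if_pos (by
          rcases hx with h | h
          · exact Or.inl h
          · exact Or.inr (List.mem_cons_of_mem _ h))]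
      · rw [if_neg hx, if_neg (by
          rintro (h | h)
          · exact hx (Or.inl h)
          · rcases List.mem_cons.mp h with h | h
            · exact hx (Or.inl (h ▸ hy))
            · exact hx (Or.inr h))]
    · simp only [List.cons_append, rdedup, if_neg hy, ih]
      by_cases hx : x ∈ y :: seen ∨ x ∈ r
      · rw [if_pos hx, if_pos (by
          rcases hx with h | h
          · rcases List.mem_cons.mp h with h | h
            · exact Or.inr (by simp [h])
            · exact Or.inl h
          · exact Or.inr (by simp [h]))]
      · rw [if_neg hx, if_neg (by
          rintro (h | h)
          · exact hx (Or.inl (by simp [h]))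
          · rcases List.mem_cons.mp h with h | h
            · exact hx (Or.inl (by simp [h]))
            · exact hx (Or.inr h))]

-- first-occurrence dedup commutes with a Boolean filter (all copies of an element are equal).
theorem filter_rdedup (p : List Int → Bool) : ∀ (l s : List (List Int)),
    (rdedup s l).filter p = rdedup s (l.filter p) := by
  intro l
  induction l with
  | nil => intro s; simp [rdedup]
  | cons x r ih =>
    intro s
    by_cases hm : x ∈ s
    · rw [rdedup_cons, if_pos hm, List.filter_cons]
      by_cases hp : p x
      · rw [if_pos hp, rdedup_cons, if_pos hm, ih]
      · rw [if_neg hp, ih]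
    · rw [rdedup_cons, if_neg hm, List.filter_cons, List.filter_cons]
      by_cases hp : p x
      · rw [if_pos hp, if_pos hp, rdedup_cons, if_neg hm, ih]
      · rw [if_neg hp, if_neg hp, ih, rdedup_congr (x :: s) s _ (fun y hy => by
          have hpy : p y = true := (List.mem_filter.mp hy).2
          simp only [List.mem_cons]
          constructor
          · rintro (rfl | h)
            · exact absurd hpy (by simp [hp])
            · exact h
          · exact Or.inr)]

-- absorbing-none fold (A's early `return float('inf')`)
theorem foldl_opt_none {α : Type} (f : Int → α → Option Int) (idxs : List α) :
    idxs.foldl (fun acc i => match acc with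
        | none => none
        | some t => f t i) none = none := by
  induction idxs with
  | nil => rfl
  | cons x r ih => simpa using ih

theorem foldl_opt_eq (ok : Int → Prop) [DecidablePred ok] (val : Int → Int) (idxs : List Int) (t : Int) :
    idxs.foldl (fun acc i => match acc with
        | none => none
        | some total => if ok i then some (total + val i) else none) (some t)
      = if ∀ i ∈ idxs, ok i then some (t + (idxs.map val).sum) else none := by
  induction idxs generalizing t with
  | nil => simp
  | cons x r ih =>
    by_cases hx : ok x
    · simp only [List.foldl_cons, if_pos hx]
      rw [ih]
      by_cases hr : ∀ i ∈ r, ok i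
      · rw [if_pos hr, if_pos (by
          intro i hi
          rcases List.mem_cons.mp hi with h | h
          · exact h ▸ hx
          · exact hr i h)]
        simp
        ring_nf
      · rw [if_neg hr, if_neg (by intro hc; exact hr (fun i hi => hc i (List.mem_cons_of_mem _ hi)))]
    · simp only [List.foldl_cons, if_neg hx]
      rw [foldl_opt_none (fun t i => if ok i then some (t + val i) else none),
        if_neg (by intro hc; exact hx (hc x (by simp)))]

theorem calc_char (ind : List Int) (dm : List (List Int)) :
    calculate_fitness ind dm =
      if (ind.length : Int) ≠ (dm.length : Int) + 1 then none
      else if (∀ i ∈ PySem.List.pyRange 0 ((ind.length : Int) - 1) 1,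
          0 ≤ PySem.List.pyGetD ind i 0 - 1 ∧ PySem.List.pyGetD ind i 0 - 1 < (dm.length : Int) ∧
          0 ≤ PySem.List.pyGetD ind (i + 1) 0 - 1 ∧ PySem.List.pyGetD ind (i + 1) 0 - 1 < (dm.length : Int)) then
        some (((PySem.List.pyRange 0 ((ind.length : Int) - 1) 1).map
          (fun i => PySem.List.pyGetD
              (PySem.List.pyGetD dm (PySem.List.pyGetD ind i 0 - 1) [])
              (PySem.List.pyGetD ind (i + 1) 0 - 1) 0)).sum)
      else none := by
  simp only [calculate_fitness]
  by_cases hlen : (ind.length : Int) ≠ (dm.length : Int) + 1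
  · rw [if_pos hlen, if_pos hlen]
  · rw [if_neg hlen, if_neg hlen]
    rw [foldl_opt_eq
      (fun i => 0 ≤ PySem.List.pyGetD ind i 0 - 1 ∧ PySem.List.pyGetD ind i 0 - 1 < (dm.length : Int) ∧
        0 ≤ PySem.List.pyGetD ind (i + 1) 0 - 1 ∧ PySem.List.pyGetD ind (i + 1) 0 - 1 < (dm.length : Int))
      (fun i => PySem.List.pyGetD
          (PySem.List.pyGetD dm (PySem.List.pyGetD ind i 0 - 1) [])
          (PySem.List.pyGetD ind (i + 1) 0 - 1) 0)]
    simp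

-- B's route_length computes exactly A's calculate_fitness.
theorem fit_eq (ind : List Int) (dm : List (List Int)) :
    route_length ind dm = calculate_fitness ind dm := by
  rw [calc_char]
  simp only [route_length]
  by_cases hlen : (ind.length : Int) ≠ (dm.length : Int) + 1
  · rw [if_pos hlen, if_pos hlen]
  · rw [if_neg hlen, if_neg hlen]
    have hmemR : ∀ i : Int, i ∈ PySem.List.pyRange 0 ((ind.length : Int) - 1) 1 ↔ 0 ≤ i ∧ i < (ind.length : Int) - 1 := by
      intro i; exact PySem.List.mem_pyRange_one
    have hget : ∀ j : Nat, j < ind.length → PySem.List.pyGetD ind (j : Int) 0 = ind[j]! := by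
      intro j hj
      rw [PySem.List.pyGetD_eq_getElem ind 0 (by positivity) (by simpa using hj)]
      simp [List.getElem!_eq_getElem?_getD, List.getElem?_eq_getElem, hj]
    have hequiv : (∀ i ∈ PySem.List.pyRange 0 ((ind.length : Int) - 1) 1,
        0 ≤ PySem.List.pyGetD ind i 0 - 1 ∧ PySem.List.pyGetD ind i 0 - 1 < (dm.length : Int) ∧
        0 ≤ PySem.List.pyGetD ind (i + 1) 0 - 1 ∧ PySem.List.pyGetD ind (i + 1) 0 - 1 < (dm.length : Int)) ↔
        ¬ (1 < ind.length ∧ ind.any (fun c => !(decide (1 ≤ c ∧ c ≤ (dm.length : Int))))) := by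
      constructor
      · intro hall hc
        rcases hc with ⟨h1, h2⟩
        simp only [List.any_eq_true, Bool.not_eq_true', decide_eq_false_iff_not] at h2
        rcases h2 with ⟨c, hc, hbad⟩
        rcases List.mem_iff_getElem.mp hc with ⟨j, hj, rfl⟩
        by_cases hjlt : j + 1 < ind.length
        · have := hall (j : Int) ((hmemR _).mpr (by constructor <;> [positivity; omega]))
          rw [hget j hj] at this
          simp only [List.getElem!_eq_getElem?_getD, List.getElem?_eq_getElem, hj, Option.getD_some] at this
          exact hbad (by omega)
        · have hj1 : 1 ≤ j := by omega
          have := hall ((j : Int) - 1) ((hmemR _).mpr (by constructor <;> omega))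
          have e1 : (j : Int) - 1 + 1 = ((j : Nat) : Int) := by omega
          have e2 : ((j - 1 : Nat) : Int) = (j : Int) - 1 := by omega
          rw [e1, hget j hj] at this
          simp only [List.getElem!_eq_getElem?_getD, List.getElem?_eq_getElem, hj, Option.getD_some] at this
          exact hbad (by omega)
      · intro hnot i hiR
        rcases (hmemR i).mp hiR with ⟨hi0, hi1⟩
        have h1 : 1 < ind.length := by omega
        have hgood : ∀ c ∈ ind, 1 ≤ c ∧ c ≤ (dm.length : Int) := by
          intro c hc
          by_contra hb
          exact hnot ⟨h1, List.any_eq_true.mpr ⟨c, hc, by simp only [Bool.not_eq_true', decide_eq_false_iff_not]; exact hb⟩⟩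
        obtain ⟨j, rfl⟩ : ∃ j : Nat, (j : Int) = i := ⟨i.toNat, by omega⟩
        have hj1 : j < ind.length := by omega
        have hj2 : j + 1 < ind.length := by omega
        have g1 := hgood ind[j]! (by
          rw [List.getElem!_eq_getElem?_getD, List.getElem?_eq_getElem hj1]
          exact List.getElem_mem _)
        have g2 := hgood ind[j+1]! (by
          rw [List.getElem!_eq_getElem?_getD, List.getElem?_eq_getElem hj2]
          exact List.getElem_mem _)
        have e : (j : Int) + 1 = ((j + 1 : Nat) : Int) := by omega
        rw [hget j hj1, e, hget (j+1) hj2]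
        omega
    by_cases hbad : 1 < ind.length ∧ ind.any (fun c => !(decide (1 ≤ c ∧ c ≤ (dm.length : Int))))
    · rw [if_pos hbad, if_neg (by rw [hequiv]; exact not_not_intro hbad)]
    · rw [if_neg hbad, if_pos (hequiv.mpr hbad)]

-- validity of an individual is the closed-form shape condition of D_.
theorem route_isSome_iff (ind : List Int) (dm : List (List Int)) :
    (route_length ind dm).isSome ↔
      (ind.length = dm.length + 1 ∧
        (2 ≤ ind.length → ∀ c ∈ ind, 1 ≤ c ∧ c ≤ (dm.length : Int))) := by
  simp only [route_length]
  by_cases hlen : (ind.length : Int) ≠ (dm.length : Int) + 1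
  · rw [if_pos hlen]
    simp only [Option.isSome_none, Bool.false_eq_true, false_iff]
    intro hc
    exact hlen (by rw [hc.1]; push_cast; ring)
  · rw [if_neg hlen]
    by_cases hbad : 1 < ind.length ∧ ind.any (fun c => !(decide (1 ≤ c ∧ c ≤ (dm.length : Int))))
    · rw [if_pos hbad]
      simp only [Option.isSome_none, Bool.false_eq_true, false_iff]
      rintro ⟨-, hall⟩
      rcases hbad with ⟨h1, h2⟩
      simp only [List.any_eq_true, Bool.not_eq_true', decide_eq_false_iff_not] at h2
      rcases h2 with ⟨c, hc, hb⟩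
      exact hb (hall (by omega) c hc)
    · rw [if_neg hbad]
      simp only [Option.isSome_some, true_iff]
      constructor
      · omega
      · intro h2 c hc
        by_contra hb
        exact hbad ⟨by omega, List.any_eq_true.mpr ⟨c, hc, by
          simp only [Bool.not_eq_true', decide_eq_false_iff_not]; exact hb⟩⟩

-- B's build pass yields exactly the decorated first occurrences of the valid individuals.
theorem buildCandidates_aux (dm : List (List Int)) (l : List (List Int))
    (cs : List (Int × List Int)) (s : List (List Int)) :
    (l.foldl (fun st ind =>
        if PySem.Set.contains st.2 ind then st
        else
          let seen := PySem.Set.add st.2 ind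
          match route_length ind dm with
          | some f => (st.1 ++ [(f, ind)], seen)
          | none => (st.1, seen)) (cs, (s : PySem.Set (List Int)))).1 =
      cs ++ ((rdedup s l).filter (fun ind => (route_length ind dm).isSome)).map
        (fun ind => ((route_length ind dm).getD 0, ind)) := by
  induction l generalizing cs s with
  | nil => simp [rdedup]
  | cons x r ih =>
    have hcont : PySem.Set.contains (s : PySem.Set (List Int)) x = decide (x ∈ s) := by
      simp [PySem.Set.contains, List.contains_iff_mem]
    by_cases hm : x ∈ s
    · rw [List.foldl_cons]
      simp only [hcont, hm, decide_true, if_true]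
      rw [ih, rdedup_cons, if_pos hm]
    · rw [List.foldl_cons]
      simp only [hcont, hm, decide_false, Bool.false_eq_true, if_false]
      have hadd : PySem.Set.add (s : PySem.Set (List Int)) x = s ++ [x] := by
        simp [PySem.Set.add, hcont, hm]
      have hcongr : rdedup (x :: s) r = rdedup (s ++ [x]) r :=
        rdedup_congr _ _ _ (fun y _ => by simp [or_comm])
      cases hv : route_length x dm with
      | some f =>
        simp only [hadd, ih, rdedup_cons, if_neg hm, List.filter_cons, hv, Option.isSome_some,
          if_true, List.map_cons, hcongr]
        simp [hv]
      | none =>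
        simp only [hadd, ih, rdedup_cons, if_neg hm, List.filter_cons]
        rw [if_neg (by simp [hv]), hcongr]

theorem buildCandidates_val (dm : List (List Int)) (l : List (List Int)) :
    (buildCandidates dm l).1 =
      ((rdedup [] l).filter (fun ind => (route_length ind dm).isSome)).map
        (fun ind => ((route_length ind dm).getD 0, ind)) := by
  have h := buildCandidates_aux dm l [] []
  simp only [List.nil_append] at h
  exact h

-- appending one element to a stable sort is one insertion.
theorem sorted_append_singleton {α : Type} (key : α → Int) (m : List α) (x : α) :
    PySem.List.sorted (m ++ [x]) key false =
      PySem.List.insertBy (fun a b => decide (key a < key b)) x (PySem.List.sorted m key false) := by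
  rw [PySem.List.sorted_eq_foldl_insertBy, PySem.List.sorted_eq_foldl_insertBy, List.foldl_append]
  simp

-- decorating with the sort key commutes with insertBy / with the stable sort.
theorem insertBy_map_pair (key : List Int → Int) (x : List Int) (s : List (List Int)) :
    PySem.List.insertBy (fun a b => decide (a.1 < b.1)) (key x, x)
        (s.map (fun ind => (key ind, ind))) =
      (PySem.List.insertBy (fun a b => decide (key a < key b)) x s).map (fun ind => (key ind, ind)) := by
  induction s with
  | nil => rfl
  | cons y r ih =>
    simp only [List.map_cons, PySem.List.insertBy]
    by_cases h : key x < key y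
    · simp [h]
    · simp only [decide_eq_true_eq, if_neg h, ih, List.map_cons]

theorem sorted_map_pair (key : List Int → Int) (l : List (List Int)) :
    PySem.List.sorted (l.map (fun ind => (key ind, ind))) (fun p => p.1) false =
      (PySem.List.sorted l (fun x => key x) false).map (fun ind => (key ind, ind)) := by
  rw [PySem.List.sorted_eq_foldl_insertBy, PySem.List.sorted_eq_foldl_insertBy, List.foldl_map]
  induction l using List.reverseRecOn with
  | nil => rfl
  | append_singleton r x ih =>
    rw [List.foldl_append, List.foldl_append]
    simp only [List.foldl_cons, List.foldl_nil]
    rw [ih, insertBy_map_pair]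

-- ---- the partial-selection side: first-minimum indices ----
def FirstMinAt (cs : List (Int × List Int)) (m : Nat) : Prop :=
  m < cs.length ∧ (∀ i, i < cs.length → cs[m]!.1 ≤ cs[i]!.1) ∧ (∀ i, i < m → cs[m]!.1 < cs[i]!.1)

theorem firstMin_uniq {cs : List (Int × List Int)} {m m' : Nat}
    (h : FirstMinAt cs m) (h' : FirstMinAt cs m') : m = m' := by
  rcases h with ⟨hl, hmin, hstr⟩
  rcases h' with ⟨hl', hmin', hstr'⟩
  rcases Nat.lt_trichotomy m m' with hlt | he | hgt
  · have := hstr' m hlt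
    have := hmin m' hl'
    omega
  · exact he
  · have := hstr m' hgt
    have := hmin' m hl
    omega

theorem firstMin_le_mem {cs : List (Int × List Int)} {m : Nat}
    (h : FirstMinAt cs m) : ∀ y ∈ cs, cs[m]!.1 ≤ y.1 := by
  intro y hy
  rcases List.mem_iff_getElem.mp hy with ⟨i, hi, rfl⟩
  have := h.2.1 i hi
  rwa [getElem!_pos cs i hi] at this

-- B's scan loop computes the first index of a minimal fitness.
theorem bestIdx_spec (cs : List (Int × List Int)) (hc : cs ≠ []) :
    ∃ m : Nat, bestIdx cs = (m : Int) ∧ FirstMinAt cs m := by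
  have key : ∀ k : Nat, 1 ≤ k → k ≤ cs.length →
      ∃ m : Nat, ((PySem.List.pyRange 1 (k : Int)).foldl
          (fun best j =>
            if (PySem.List.pyGetD cs j (0, [])).1 < (PySem.List.pyGetD cs best (0, [])).1 then j else best) 0
        = (m : Int)) ∧ m < k ∧
        (∀ i, i < k → cs[m]!.1 ≤ cs[i]!.1) ∧ (∀ i, i < m → cs[m]!.1 < cs[i]!.1) := by
    intro k
    induction k with
    | zero => omega
    | succ k ih =>
      intro _ hk
      by_cases hk1 : 1 ≤ k
      · obtain ⟨m, hfold, hmk, hmin, hstr⟩ := ih hk1 (by omega)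
        have hrange : PySem.List.pyRange 1 ((k + 1 : Nat) : Int) =
            PySem.List.pyRange 1 (k : Int) ++ [(k : Int)] := by
          have := PySem.List.pyRange_one_succ_right (a := 1) (b := (k : Int)) (by exact_mod_cast hk1)
          rw [← this]
          norm_num
        rw [hrange, List.foldl_append]
        simp only [List.foldl_cons, List.foldl_nil, hfold]
        have hkc : k < cs.length := by omega
        have hmc : m < cs.length := by omega
        have hgk : PySem.List.pyGetD cs ((k : Nat) : Int) (0, []) = cs[k]! := by
          rw [PySem.List.pyGetD_eq_getElem cs _ (by positivity) (by simpa using hkc)]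
          simp [getElem!_pos, hkc]
        have hgm : PySem.List.pyGetD cs ((m : Nat) : Int) (0, []) = cs[m]! := by
          rw [PySem.List.pyGetD_eq_getElem cs _ (by positivity) (by simpa using hmc)]
          simp [getElem!_pos, hmc]
        rw [hgk, hgm]
        by_cases hcmp : cs[k]!.1 < cs[m]!.1
        · refine ⟨k, by rw [if_pos hcmp], by omega, ?_, ?_⟩
          · intro i hi
            rcases Nat.lt_succ_iff_lt_or_eq.mp hi with hi | rfl
            · exact le_trans (le_of_lt hcmp) (hmin i hi)
            · exact le_refl _
          · intro i hi
            exact lt_of_lt_of_le hcmp (hmin i hi)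
        · refine ⟨m, by rw [if_neg hcmp], by omega, ?_, hstr⟩
          intro i hi
          rcases Nat.lt_succ_iff_lt_or_eq.mp hi with hi | rfl
          · exact hmin i hi
          · omega
      · have hk0 : k = 0 := by omega
        subst hk0
        refine ⟨0, ?_, by omega, ?_, by omega⟩
        · norm_num [PySem.List.pyRange]
        · intro i hi
          have : i = 0 := by omega
          simp [this]
  have hlen : 1 ≤ cs.length := by
    cases cs with
    | nil => exact absurd rfl hc
    | cons _ _ => simp
  obtain ⟨m, hfold, hmk, hmin, hstr⟩ := key cs.length hlen (le_refl _)
  exact ⟨m, hfold, hmk, hmin, hstr⟩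

-- the head of the stable sort is the first minimal element; the tail sorts the rest.
theorem sorted_firstMin_cons : ∀ (cs : List (Int × List Int)) (m : Nat), FirstMinAt cs m →
    PySem.List.sorted cs (fun p => p.1) false =
      cs[m]! :: PySem.List.sorted (cs.eraseIdx m) (fun p => p.1) false := by
  intro cs
  induction cs using List.reverseRecOn with
  | nil => intro m hm; exact absurd hm.1 (by simp)
  | append_singleton r x ih =>
    intro m hm
    rw [sorted_append_singleton]
    rcases eq_or_ne r [] with rfl | hr
    · have hm0 : m = 0 := by have := hm.1; simp at this; omega
      subst hm0
      rfl
    · obtain ⟨m', _, hm'⟩ := bestIdx_spec r hr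
      have hgel : ∀ i, i < r.length → (r ++ [x])[i]! = r[i]! := by
        intro i hi
        rw [getElem!_pos _ i (by simp; omega), getElem!_pos r i hi,
          List.getElem_append_left hi]
      have hgex : (r ++ [x])[r.length]! = x := by
        rw [getElem!_pos _ r.length (by simp), List.getElem_concat_length rfl]
      by_cases hlt : x.1 < r[m']!.1
      · have hfm : FirstMinAt (r ++ [x]) r.length := by
          refine ⟨by simp, ?_, ?_⟩
          · intro i hi
            simp only [List.length_append, List.length_cons, List.length_nil] at hi
            rcases Nat.lt_succ_iff_lt_or_eq.mp (by omega : i < r.length + 1) with hi' | rfl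
            · rw [hgex, hgel i hi']
              exact le_trans (le_of_lt hlt) (hm'.2.1 i hi')
            · rw [hgex]
          · intro i hi
            rw [hgex, hgel i hi]
            exact lt_of_lt_of_le hlt (hm'.2.1 i hi)
        have hme : m = r.length := firstMin_uniq hm hfm
        subst hme
        rw [hgex, show (r ++ [x]).eraseIdx r.length = r by
          rw [List.eraseIdx_append_of_length_le (le_refl _)]; simp]
        cases hs : PySem.List.sorted r (fun p => p.1) false with
        | nil => exact absurd ((PySem.List.sorted_eq_nil_iff r _ false).mp hs) hr
        | cons y t =>
          have hy : y ∈ r := (PySem.List.mem_sorted r _ false y).mp (hs ▸ List.mem_cons_self)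
          have hxy : x.1 < y.1 := lt_of_lt_of_le hlt (firstMin_le_mem hm' y hy)
          simp [PySem.List.insertBy, hxy]
      · have hfm : FirstMinAt (r ++ [x]) m' := by
          refine ⟨by have := hm'.1; simp; omega, ?_, ?_⟩
          · intro i hi
            simp only [List.length_append, List.length_cons, List.length_nil] at hi
            rw [hgel m' hm'.1]
            rcases Nat.lt_succ_iff_lt_or_eq.mp (by omega : i < r.length + 1) with hi' | rfl
            · rw [hgel i hi']
              exact hm'.2.1 i hi'
            · rw [hgex]
              exact not_lt.mp hlt
          · intro i hi
            rw [hgel m' hm'.1, hgel i (by have := hm'.1; omega)]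
            exact hm'.2.2 i hi
        have hme : m = m' := firstMin_uniq hm hfm
        subst hme
        rw [hgel m hm'.1, List.eraseIdx_append_of_lt_length hm'.1,
          sorted_append_singleton, ih m hm']
        simp only [PySem.List.insertBy, decide_eq_true_eq, if_neg hlt]

-- B's selection loop is take(psize) of the stable sort.
theorem selectLoop_eq : ∀ (fuel : Nat) (cs : List (Int × List Int)), cs.length ≤ fuel →
    ∀ (acc : List (List Int)) (psize : Int),
    selectLoop fuel cs acc psize =
      acc ++ ((PySem.List.sorted cs (fun p => p.1) false).map Prod.snd).take
        ((psize - acc.length).toNat) := by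
  intro fuel
  induction fuel with
  | zero =>
    intro cs hn acc psize
    have : cs = [] := List.length_eq_zero_iff.mp (by omega)
    subst this
    simp [selectLoop, PySem.List.sorted]
  | succ fuel ih =>
    intro cs hn acc psize
    by_cases hnil : cs = []
    · subst hnil
      simp [selectLoop, PySem.List.sorted]
    · by_cases hps : psize ≤ (acc.length : Int)
      · rw [selectLoop, if_pos (Or.inr hps)]
        have : (psize - acc.length).toNat = 0 := by omega
        simp [this]
      · rw [selectLoop, if_neg (by tauto)]
        obtain ⟨m, hb, hm⟩ := bestIdx_spec cs hnil
        rw [hb]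
        have hpop : PySem.List.pop? cs (m : Int) = some (cs[m]!, cs.eraseIdx m) := by
          rw [getElem!_pos cs m hm.1]
          exact PySem.List.pop?_natCast cs m hm.1
        simp only [hpop]
        have hrec := ih (cs.eraseIdx m) (by
            rw [List.length_eraseIdx_of_lt hm.1]; omega)
          (acc ++ [cs[m]!.2]) psize
        rw [hrec]
        rw [sorted_firstMin_cons cs m hm]
        have ht : (psize - acc.length).toNat = (psize - ((acc ++ [cs[m]!.2]).length : Int)).toNat + 1 := by
          simp only [List.length_append, List.length_cons, List.length_nil]
          omega
        rw [ht]
        simp [List.take_succ_cons]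

-- the change region, read back as a proposition.
theorem D_iff (pop off dm : List (List Int)) (psize : Int) :
    D_replace_population pop off dm psize ↔
      (psize ≤ 0 ∧ ∃ ind ∈ pop ++ off,
        ind.length = dm.length + 1 ∧
        (2 ≤ ind.length → ∀ c ∈ ind, 1 ≤ c ∧ c ≤ (dm.length : Int))) := by
  unfold D_replace_population
  simp only [Bool.and_eq_true, Bool.or_eq_true, List.any_eq_true, List.all_eq_true,
    decide_eq_true_eq, beq_iff_eq]
  constructor
  · rintro ⟨h1, ind, hmem, hlen, h3⟩
    refine ⟨h1, ind, hmem, hlen, ?_⟩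
    intro h2 c hc
    rcases h3 with h3 | h3
    · omega
    · exact h3 c hc
  · rintro ⟨h1, ind, hmem, hlen, h3⟩
    refine ⟨h1, ind, hmem, hlen, ?_⟩
    by_cases h2 : ind.length < 2
    · exact Or.inl h2
    · exact Or.inr (h3 (by omega))

-- A's dedup-while-taking loop, while the target size has not yet been reached.
theorem take_eq (l : List (List Int)) (newp seen : List (List Int)) (psize : Int)
    (h : (newp.length : Int) < psize) :
    replacePopTake l newp seen psize = newp ++ (rdedup seen l).take ((psize - newp.length).toNat) := by
  induction l generalizing newp seen with
  | nil => simp [replacePopTake, rdedup]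
  | cons ind rest ih =>
    by_cases hm : ind ∈ seen
    · have hc : PySem.Set.contains seen ind = true := by
        simp [PySem.Set.contains, List.contains_iff_mem, hm]
      simp only [replacePopTake, hc, if_true, ih _ _ h, rdedup, if_pos hm]
    · have hc : ¬ PySem.Set.contains seen ind = true := by
        simp [PySem.Set.contains, List.contains_iff_mem, hm]
      simp only [replacePopTake, if_neg hc, rdedup, if_neg hm]
      by_cases hb : psize ≤ (((newp ++ [ind]).length : Nat) : Int)
      · have h1 : (psize - newp.length).toNat = 1 := by simp at hb; omega
        rw [if_pos hb, h1]
        simp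
      · have hadd : PySem.Set.add seen ind = seen ++ [ind] := by
          simp [PySem.Set.add, PySem.Set.contains, List.contains_iff_mem, hm]
        have hlt : (((newp ++ [ind]).length : Nat) : Int) < psize := by simp at hb ⊢; omega
        rw [if_neg hb, ih _ _ hlt, hadd]
        have hcg : rdedup (seen ++ [ind]) rest = rdedup (ind :: seen) rest :=
          rdedup_congr _ _ _ (fun y _ => by simp [or_comm])
        have h2 : (psize - newp.length).toNat = (psize - ((newp ++ [ind]).length : Nat)).toNat + 1 := by
          simp; omega
        rw [hcg, h2]
        simp

-- first-occurrence dedup commutes with the stable sort (A interleaves dedup after the sort).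
theorem rdedup_insertBy_mem (key : List Int → Int) (x : List Int) :
    ∀ (s seen : List (List Int)), (x ∈ seen ∨ x ∈ s) →
      s.Pairwise (fun a b => key a ≤ key b) →
      rdedup seen (PySem.List.insertBy (fun a b => decide (key a < key b)) x s) = rdedup seen s := by
  intro s
  induction s with
  | nil =>
    intro seen hx _
    simp only [List.not_mem_nil, or_false] at hx
    simp [PySem.List.insertBy, rdedup, hx]
  | cons y ys ih =>
    intro seen hx hp
    simp only [PySem.List.insertBy, decide_eq_true_eq]
    by_cases hlt : key x < key y
    · rw [if_pos hlt]
      have hxseen : x ∈ seen := by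
        rcases hx with h | h
        · exact h
        · rcases List.mem_cons.mp h with rfl | h
          · omega
          · have := (List.pairwise_cons.mp hp).1 x h
            omega
      show rdedup seen (x :: y :: ys) = _
      rw [rdedup_cons, if_pos hxseen]
    · rw [if_neg hlt]
      show rdedup seen (y :: PySem.List.insertBy _ x ys) = rdedup seen (y :: ys)
      by_cases hy : y ∈ seen
      · rw [rdedup_cons, if_pos hy, rdedup_cons, if_pos hy]
        exact ih seen (by
          rcases hx with h | h
          · exact Or.inl h
          · rcases List.mem_cons.mp h with rfl | h
            · exact Or.inl hy
            · exact Or.inr h) (List.pairwise_cons.mp hp).2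
      · rw [rdedup_cons, if_neg hy, rdedup_cons (r := ys), if_neg hy]
        refine congrArg _ (ih (y :: seen) ?_ (List.pairwise_cons.mp hp).2)
        rcases hx with h | h
        · exact Or.inl (List.mem_cons_of_mem _ h)
        · rcases List.mem_cons.mp h with rfl | h
          · exact Or.inl (by simp)
          · exact Or.inr h

theorem rdedup_insertBy_not_mem (key : List Int → Int) (x : List Int) :
    ∀ (s seen : List (List Int)), x ∉ s → x ∉ seen →
      s.Pairwise (fun a b => key a ≤ key b) →
      rdedup seen (PySem.List.insertBy (fun a b => decide (key a < key b)) x s) =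
        PySem.List.insertBy (fun a b => decide (key a < key b)) x (rdedup seen s) := by
  intro s
  induction s with
  | nil =>
    intro seen _ hxseen _
    simp [PySem.List.insertBy, rdedup, hxseen]
  | cons y ys ih =>
    intro seen hxs hxseen hp
    have hxy : x ≠ y := fun h => hxs (h ▸ List.mem_cons_self)
    simp only [PySem.List.insertBy, decide_eq_true_eq]
    by_cases hlt : key x < key y
    · rw [if_pos hlt]
      have hmem : ∀ z ∈ rdedup seen (y :: ys), key x < key z := by
        intro z hz
        have hz' := mem_of_mem_rdedup hz
        rcases List.mem_cons.mp hz' with rfl | h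
        · exact hlt
        · have := (List.pairwise_cons.mp hp).1 z h
          omega
      show rdedup seen (x :: y :: ys) = _
      rw [rdedup_cons, if_neg hxseen]
      have hcongr : rdedup (x :: seen) (y :: ys) = rdedup seen (y :: ys) :=
        rdedup_congr _ _ _ (fun w hw => by
          simp only [List.mem_cons]
          constructor
          · rintro (rfl | h)
            · exact absurd hw hxs
            · exact h
          · exact Or.inr)
      rw [hcongr]
      cases hrd : rdedup seen (y :: ys) with
      | nil => rfl
      | cons z zs =>
        have hz : key x < key z := hmem z (by rw [hrd]; simp)
        simp [PySem.List.insertBy, hz]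
    · rw [if_neg hlt]
      show rdedup seen (y :: PySem.List.insertBy _ x ys) =
        PySem.List.insertBy _ x (rdedup seen (y :: ys))
      have hxys : x ∉ ys := fun h => hxs (List.mem_cons_of_mem _ h)
      by_cases hy : y ∈ seen
      · rw [rdedup_cons, if_pos hy, rdedup_cons, if_pos hy]
        exact ih seen hxys hxseen (List.pairwise_cons.mp hp).2
      · rw [rdedup_cons, if_neg hy, rdedup_cons (r := ys), if_neg hy]
        rw [ih (y :: seen) hxys (by
          intro h
          rcases List.mem_cons.mp h with rfl | h
          · exact hxy rfl
          · exact hxseen h) (List.pairwise_cons.mp hp).2]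
        simp only [PySem.List.insertBy, decide_eq_true_eq, if_neg hlt]

theorem rdedup_sorted (key : List Int → Int) (l : List (List Int)) :
    rdedup [] (PySem.List.sorted l (fun x => key x) false) =
      PySem.List.sorted (rdedup [] l) (fun x => key x) false := by
  induction l using List.reverseRecOn with
  | nil => rfl
  | append_singleton r x ih =>
    rw [sorted_append_singleton]
    by_cases hx : x ∈ r
    · rw [rdedup_insertBy_mem key x _ [] (Or.inr (by
          rw [PySem.List.mem_sorted]; exact hx))
        (PySem.List.sorted_pairwise r (fun y => key y)), ih,
        rdedup_append_singleton, if_pos (Or.inr hx)]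
    · rw [rdedup_insertBy_not_mem key x _ [] (by
          rw [PySem.List.mem_sorted]; exact hx) (List.not_mem_nil)
        (PySem.List.sorted_pairwise r (fun y => key y)), ih,
        rdedup_append_singleton, if_neg (by simp [hx]), sorted_append_singleton]

-- assembly: both programs reduce to take(population_size) of the sorted unique valid individuals.
theorem alt_char (pop off dm : List (List Int)) (psize : Int) :
    replace_population_alt pop off dm psize =
      (PySem.List.sorted
          (rdedup [] ((pop ++ off).filter (fun ind => (route_length ind dm).isSome)))
          (fun x => (route_length x dm).getD 0) false).take psize.toNat := by
  show selectLoop (buildCandidates dm (pop ++ off)).1.length (buildCandidates dm (pop ++ off)).1 [] psize = _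
  rw [buildCandidates_val, selectLoop_eq _ _ (le_refl _),
    filter_rdedup (fun ind => (route_length ind dm).isSome) (pop ++ off) [],
    sorted_map_pair (fun x => (route_length x dm).getD 0)]
  simp [List.map_map, Function.comp_def]

theorem a_char (pop off dm : List (List Int)) (psize : Int) :
    replace_population pop off dm psize =
      replacePopTake
        (PySem.List.sorted
          ((pop ++ off).filter (fun ind => (route_length ind dm).isSome))
          (fun x => (route_length x dm).getD 0) false) [] PySem.Set.empty psize := by
  show replacePopTake _ [] PySem.Set.empty psize = _
  have hf : (pop ++ off).filter (fun ind => (calculate_fitness ind dm).isSome)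
      = (pop ++ off).filter (fun ind => (route_length ind dm).isSome) :=
    List.filter_congr (fun ind _ => by rw [fit_eq])
  have hk : (fun x => (calculate_fitness x dm).getD 0) = (fun x => (route_length x dm).getD 0) := by
    funext x; rw [fit_eq]
  rw [hf, hk]

-- ===== VERDICT (by name: the statement is the Claim_ definition above) =====
theorem replace_population_spec : Claim_unchanged_replace_population := by
  intro pop off dm psize _hDom _hPre
  unfold Spec_replace_population
  intro hD
  rw [D_iff] at hD
  rw [a_char, alt_char]
  by_cases hpos : 0 < psize
  · rw [take_eq _ _ _ _ (by simpa using hpos)]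
    rw [show (PySem.Set.empty : PySem.Set (List Int)) = ([] : List (List Int)) from rfl]
    rw [rdedup_sorted (fun x => (route_length x dm).getD 0)]
    simp
  · have hnov : ¬ ∃ ind ∈ pop ++ off,
        ind.length = dm.length + 1 ∧
          (2 ≤ ind.length → ∀ c ∈ ind, 1 ≤ c ∧ c ≤ (dm.length : Int)) := by
      intro hc
      exact hD ⟨by omega, hc⟩
    have hnil : (pop ++ off).filter (fun ind => (route_length ind dm).isSome) = [] := by
      rw [List.filter_eq_nil_iff]
      intro ind hmem
      simp only [Bool.not_eq_true, Option.isSome_eq_false_iff, Option.isNone_iff_eq_none]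
      rcases ho : route_length ind dm with _ | v
      · rfl
      · exact absurd ⟨ind, hmem, (route_isSome_iff ind dm).mp (by simp [ho])⟩ hnov
    rw [hnil]
    show replacePopTake (PySem.List.sorted [] _ false) [] _ _ = _
    have : psize.toNat = 0 := by omega
    simp [PySem.List.sorted, replacePopTake, this, rdedup]

theorem replace_population_changed : Claim_changed_replace_population := by
  unfold Claim_changed_replace_population; decide

theorem replace_population_tight : Claim_exact_replace_population := by
  intro pop off dm psize _hDom _hPre hD
  rw [D_iff] at hD
  rcases hD with ⟨hps, ind, hmem, hshape⟩
  rw [a_char, alt_char]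
  have hv : (route_length ind dm).isSome := (route_isSome_iff ind dm).mpr hshape
  have hne : (pop ++ off).filter (fun ind => (route_length ind dm).isSome) ≠ [] := by
    intro hc
    have := List.filter_eq_nil_iff.mp hc ind hmem
    simp [hv] at this
  have hsne : PySem.List.sorted
      ((pop ++ off).filter (fun ind => (route_length ind dm).isSome))
      (fun x => (route_length x dm).getD 0) false ≠ [] := by
    intro hc
    exact hne ((PySem.List.sorted_eq_nil_iff _ _ _).mp hc)
  rcases hs : PySem.List.sorted
      ((pop ++ off).filter (fun ind => (route_length ind dm).isSome))
      (fun x => (route_length x dm).getD 0) false with _ | ⟨y, t⟩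
  · exact absurd hs hsne
  · have htoNat : psize.toNat = 0 := by omega
    rw [htoNat, List.take_zero]
    show replacePopTake (y :: t) [] PySem.Set.empty psize ≠ []
    have hc : ¬ PySem.Set.contains PySem.Set.empty y = true := by
      simp [PySem.Set.contains, PySem.Set.empty]
    simp only [replacePopTake, if_neg hc]
    rw [if_pos (by simp; omega)]
    simp
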